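-- pv_equiv track=rewrite | github.com/pluginagentmarketplace/custom-plugin-aws | skills/database-design/scripts/migration_manager.py | _extract_down_migration
-- ===== SOURCE A (Python) =====
-- from typing import Dict, List, Optional
--
-- def _extract_down_migration(content: str) -> Optional[str]:
--     """Extract down migration SQL from file content."""
--     lines = content.split("\n")
--     down_lines = []
--     in_rollback = False
--
--     for line in lines:
--         if "@rollback" in line.lower():
--             in_rollback = True
--             continue
--         if in_rollback and not line.strip().startswith("--"):
--             down_lines.append(line)
--
--     return "\n".join(down_lines) if down_lines else None
-- ===== SOURCE B (Python) =====
-- from typing import Optional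
--
-- def _extract_down_migration(content: str) -> Optional[str]:
--     """Extract down migration SQL from file content."""
--     result = None
--     stack = []
--     for line in reversed(content.split("\n")):
--         if "@rollback" in line.lower():
--             result = stack[:]
--         elif not line.strip().startswith("--"):
--             stack.append(line)
--     return "\n".join(reversed(result)) if result else None
-- ===== Notes on version B (the rewrite author's own statement) =====
-- stated objective: alternative
-- what changed: Replaces A's forward pass that threads an in_rollback flag with a single reverse scan: kept lines are pushed onto a stack back-to-front and each marker line snapshots the stack, so the last snapshot (the first marker in file order) is the answer; no flag and no marker search.
import Mathlib
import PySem

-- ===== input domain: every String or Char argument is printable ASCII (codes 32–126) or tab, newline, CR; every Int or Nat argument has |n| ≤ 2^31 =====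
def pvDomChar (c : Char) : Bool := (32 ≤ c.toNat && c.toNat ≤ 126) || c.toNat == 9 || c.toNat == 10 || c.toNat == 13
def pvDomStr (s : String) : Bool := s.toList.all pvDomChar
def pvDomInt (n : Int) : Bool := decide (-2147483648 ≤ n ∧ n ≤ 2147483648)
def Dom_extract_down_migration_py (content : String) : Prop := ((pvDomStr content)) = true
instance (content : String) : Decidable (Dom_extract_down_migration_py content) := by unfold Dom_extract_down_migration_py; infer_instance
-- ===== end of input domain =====

-- B replaces A's forward flag-threading pass with a reverse scan (stack + snapshot on marker), building the output back-to-front; alternative decomposition, same cost.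

-- ===== PORT A =====
-- "@rollback" in line.lower()
def pvMark (line : String) : Bool := PySem.Str.isIn "@rollback" (PySem.Str.lower line)
-- line.strip().startswith("--")
def pvComment (line : String) : Bool := PySem.Str.startswith (PySem.Str.strip line) "--"

-- loop body of A: state = (down_lines, in_rollback)
def pvStepA (st : List String × Bool) (line : String) : List String × Bool :=
  if pvMark line then (st.1, true)
  else if st.2 && !pvComment line then (st.1 ++ [line], st.2)
  else st

-- content.split("\n"); sep is the non-empty literal "\n", so split? is always some and getD is exact
def pvLines (content : String) : List String := (PySem.Str.split? content "\n").getD []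

def extract_down_migration_py (content : String) : Option String :=
  let lines := pvLines content
  let st := lines.foldl pvStepA ([], false)
  if st.1.isEmpty then none else some (PySem.Str.join "\n" st.1)

-- ===== PORT B =====
-- loop body of B: state = (result, stack); a marker snapshots the stack, a kept line is pushed
def pvStepB (st : Option (List String) × List String) (line : String) : Option (List String) × List String :=
  if pvMark line then (some st.2, st.2)
  else if !pvComment line then (st.1, st.2 ++ [line])
  else st

def extract_down_migration_py_alt (content : String) : Option String :=
  let st := (pvLines content).reverse.foldl pvStepB (none, [])
  match st.1 with
  | none => none
  | some r => if r.isEmpty then none else some (PySem.Str.join "\n" r.reverse)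

-- ===== PRECONDITION & SPEC =====
-- A is total: no Pre_.
def Spec_extract_down_migration_py (content : String) (out : Option String) : Prop := out = extract_down_migration_py_alt content
instance (content : String) (out : Option String) : Decidable (Spec_extract_down_migration_py content out) := by unfold Spec_extract_down_migration_py; infer_instance

-- ===== CLAIM =====
def Claim_equal_extract_down_migration_py : Prop := ∀ (content : String), Dom_extract_down_migration_py content → Spec_extract_down_migration_py content (extract_down_migration_py content)

-- ===== LEMMAS AND PROOFS =====
-- the comprehension-style keep test both characterisations reduce to
def pvKeep (line : String) : Bool := !pvMark line && !pvComment line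

-- A, once the flag is true, collects exactly the pvKeep-filtered lines
theorem pvFoldA_true (ls : List String) (acc : List String) :
    ls.foldl pvStepA (acc, true) = (acc ++ ls.filter pvKeep, true) := by
  induction ls generalizing acc with
  | nil => simp
  | cons l t ih =>
    simp only [List.foldl_cons, List.filter_cons, pvStepA, pvKeep]
    by_cases hm : pvMark l
    · simp [hm, ih]
    · by_cases hc : pvComment l
      · simp [hm, hc, ih]
      · simp [hm, hc, ih]

-- A's accumulator = the pvKeep-filtered tail after the first marker line
theorem pvFoldA_false (ls : List String) :
    (ls.foldl pvStepA ([], false)).1 =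
      (match ls.findIdx? pvMark with
       | none => []
       | some idx => (ls.drop (idx + 1)).filter pvKeep) := by
  induction ls with
  | nil => simp
  | cons l t ih =>
    by_cases hm : pvMark l
    · simp [List.foldl_cons, pvStepA, hm, List.findIdx?_cons, pvFoldA_true]
    · have h1 : pvStepA ([], false) l = ([], false) := by simp [pvStepA, hm]
      rw [List.foldl_cons, h1, ih, List.findIdx?_cons]
      cases h : t.findIdx? pvMark with
      | none => simp [hm]
      | some j => simp [hm]

-- B's reverse scan: stack = reversed kept lines, result = snapshot at the first marker
theorem pvFoldB (ls : List String) :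
    ls.reverse.foldl pvStepB (none, []) =
      ((ls.findIdx? pvMark).map (fun idx => ((ls.drop (idx + 1)).filter pvKeep).reverse),
       (ls.filter pvKeep).reverse) := by
  rw [List.foldl_reverse]
  induction ls with
  | nil => simp
  | cons l t ih =>
    rw [List.foldr_cons, ih]
    simp only [pvStepB, List.findIdx?_cons, List.filter_cons, pvKeep]
    by_cases hm : pvMark l
    · simp [hm]
    · by_cases hc : pvComment l
      · simp [hm, hc]
        cases h : t.findIdx? pvMark with
        | none => simp
        | some j => simp
      · simp [hm, hc]
        cases h : t.findIdx? pvMark with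
        | none => simp
        | some j => simp

-- ===== VERDICT =====
theorem extract_down_migration_py_spec : Claim_equal_extract_down_migration_py := by
  intro content _
  unfold Spec_extract_down_migration_py extract_down_migration_py extract_down_migration_py_alt
  simp only [pvFoldB]
  rw [pvFoldA_false]
  cases h : (pvLines content).findIdx? pvMark with
  | none => simp
  | some idx => simp
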